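-- pv_equiv track=rewrite | github.com/Praneeth-496/Enhanced-Sokoban-Procedural-Content-Generation-and-AI-Agents | pcg_generator.py | detect_simple_deadlocks
-- ===== SOURCE A (Python) =====
-- import collections
--
-- FLOOR = ' '
--
-- PLAYER = '@'
--
-- BOX = '$'
--
-- GOAL = '.'
--
-- BOX_ON_GOAL = '*'
--
-- PLAYER_ON_GOAL = '+' # Player on a goal square
--
-- def get_goal_positions(matrix):
--     """Extract goal positions from the level matrix"""
--     goal_positions = []
--     for r, row in enumerate(matrix):
--         for c, char in enumerate(row):
--             if char == GOAL or char == BOX_ON_GOAL or char == PLAYER_ON_GOAL: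
--                 goal_positions.append((r, c))
--     return goal_positions
--
-- def detect_simple_deadlocks(matrix):
--     """
--     Detect simple deadlock squares - squares from which a box can never reach a goal
--     Returns a set of coordinates representing deadlock squares
--     """
--     rows, cols = len(matrix), len(matrix[0])
--     goal_positions = get_goal_positions(matrix)
--
--     # Create a copy of the matrix without boxes for deadlock detection
--     clean_matrix = []
--     for r in range(rows):
--         row = []
--         for c in range(cols):
--             if matrix[r][c] == BOX:
--                 row.append(FLOOR)
--             elif matrix[r][c] == BOX_ON_GOAL:
--                 row.append(GOAL)
--             else:
--                 row.append(matrix[r][c])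
--         clean_matrix.append(row)
--
--     # Mark all squares from which a box can be pushed to a goal
--     reachable_squares = set()
--
--     # For each goal, do a reverse BFS to find all squares from which a box can reach it
--     for goal_r, goal_c in goal_positions:
--         # Start with the goal square
--         queue = collections.deque([(goal_r, goal_c)])
--         visited = set([(goal_r, goal_c)])
--
--         while queue:
--             r, c = queue.popleft()
--             reachable_squares.add((r, c))
--
--             # Check all four directions
--             for dr, dc in [(-1, 0), (1, 0), (0, -1), (0, 1)]:
--                 # Position of potential box
--                 box_r, box_c = r + dr, c + dc
--                 # Position of potential player to push the box
--                 player_r, player_c = box_r + dr, box_c + dc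
--
--                 # Check if positions are valid
--                 if not (0 <= box_r < rows and 0 <= box_c < cols and
--                         0 <= player_r < rows and 0 <= player_c < cols):
--                     continue
--
--                 # Check if the box can be pushed from this position
--                 if (clean_matrix[box_r][box_c] in [FLOOR, GOAL, PLAYER, PLAYER_ON_GOAL] and
--                     clean_matrix[player_r][player_c] in [FLOOR, GOAL, PLAYER, PLAYER_ON_GOAL] and
--                     (box_r, box_c) not in visited):
--
--                     visited.add((box_r, box_c))
--                     queue.append((box_r, box_c))
--
--     # All squares that are not walls and not reachable are deadlock squares
--     deadlock_squares = set()
--     for r in range(rows):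
--         for c in range(cols):
--             if (clean_matrix[r][c] in [FLOOR, GOAL, PLAYER, PLAYER_ON_GOAL, BOX, BOX_ON_GOAL] and
--                 (r, c) not in reachable_squares and
--                 (r, c) not in goal_positions):
--                 deadlock_squares.add((r, c))
--
--     return deadlock_squares
-- ===== SOURCE B (Python) =====
-- FLOOR = ' '
-- PLAYER = '@'
-- BOX = '$'
-- GOAL = '.'
-- BOX_ON_GOAL = '*'
-- PLAYER_ON_GOAL = '+'
--
--
-- def detect_simple_deadlocks(matrix):
--     """Fixed-point grid sweeps: repeatedly mark every square that has a marked
--     push-predecessor until a full sweep changes nothing (no queue, no per-goal BFS)."""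
--     rows, cols = len(matrix), len(matrix[0])
--
--     def free(r, c):
--         ch = matrix[r][c]
--         ch = FLOOR if ch == BOX else (GOAL if ch == BOX_ON_GOAL else ch)
--         return ch in (FLOOR, GOAL, PLAYER, PLAYER_ON_GOAL)
--
--     marked = {(r, c) for r, row in enumerate(matrix)
--               for c, ch in enumerate(row) if ch in (GOAL, BOX_ON_GOAL, PLAYER_ON_GOAL)}
--
--     changed = True
--     while changed:
--         changed = False
--         for r in range(rows):
--             for c in range(cols):
--                 if (r, c) not in marked and free(r, c) and any(
--                         (r - dr, c - dc) in marked
--                         and 0 <= r + dr < rows and 0 <= c + dc < cols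
--                         and free(r + dr, c + dc)
--                         for dr, dc in ((-1, 0), (1, 0), (0, -1), (0, 1))):
--                     marked.add((r, c))
--                     changed = True
--
--     not_wall = (FLOOR, GOAL, PLAYER, PLAYER_ON_GOAL, BOX, BOX_ON_GOAL)
--     return {(r, c) for r in range(rows) for c in range(cols)
--             if matrix[r][c] in not_wall and (r, c) not in marked}
-- ===== Notes on version B (the rewrite author's own statement) =====
-- stated objective: alternative
-- what changed: B replaces A's one reverse BFS per goal (queue + visited set per goal) with a queue-free fixed-point computation: whole-grid sweeps that mark any square with a marked push-predecessor, repeated until a sweep changes nothing.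
import Mathlib
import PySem

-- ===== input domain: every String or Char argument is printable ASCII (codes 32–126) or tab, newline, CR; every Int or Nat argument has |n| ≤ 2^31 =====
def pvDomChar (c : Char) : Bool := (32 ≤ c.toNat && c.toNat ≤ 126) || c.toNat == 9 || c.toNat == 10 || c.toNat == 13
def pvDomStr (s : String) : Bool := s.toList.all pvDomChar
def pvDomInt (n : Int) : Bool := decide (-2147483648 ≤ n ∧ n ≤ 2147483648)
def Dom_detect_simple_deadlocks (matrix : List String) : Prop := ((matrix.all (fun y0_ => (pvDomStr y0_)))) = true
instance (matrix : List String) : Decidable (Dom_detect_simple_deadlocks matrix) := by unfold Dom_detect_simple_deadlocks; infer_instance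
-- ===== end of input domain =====

-- B replaces A's one-reverse-BFS-per-goal (queue + per-goal visited set) with a queue-free
-- fixed-point computation: whole-grid sweeps that mark any square with a marked
-- push-predecessor, repeated until a sweep changes nothing.

-- ===== PORT A =====

-- shared by both ports (the same lines of Python occur in A and B): the clean-char
-- translation ('$'→floor, '*'→goal), the goal scan, raw matrix cell access.
def pvCleanChar (ch : Char) : Char := if ch = '$' then ' ' else if ch = '*' then '.' else ch

def pvGoals (matrix : List String) : List (Int × Int) :=
  (PySem.List.enumerate matrix 0).flatMap (fun rr =>
    (PySem.List.enumerate rr.2.toList 0).filterMap (fun cc =>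
      if cc.2 = '.' ∨ cc.2 = '*' ∨ cc.2 = '+' then some (rr.1, cc.1) else none))

-- matrix[r][c] (indices are in range wherever either Python reads a cell)
def pvMget (matrix : List String) (r c : Int) : Char :=
  (PySem.Str.pyGet? (PySem.List.pyGetD matrix r "") c).getD '?'

def pvDirs : List (Int × Int) := [(-1, 0), (1, 0), (0, -1), (0, 1)]

-- A's inner `for dr, dc in dirs:` legality scan producing the enqueue candidates
def pvNbrs (free : Int → Int → Bool) (rows cols : Int) (p : Int × Int) : List (Int × Int) :=
  pvDirs.filterMap (fun d =>
    if 0 ≤ p.1 + d.1 ∧ p.1 + d.1 < rows ∧ 0 ≤ p.2 + d.2 ∧ p.2 + d.2 < cols ∧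
       0 ≤ p.1 + d.1 + d.1 ∧ p.1 + d.1 + d.1 < rows ∧ 0 ≤ p.2 + d.2 + d.2 ∧ p.2 + d.2 + d.2 < cols then
      (if free (p.1 + d.1) (p.2 + d.2) && free (p.1 + d.1 + d.1) (p.2 + d.2 + d.2) then
        some (p.1 + d.1, p.2 + d.2)
      else none)
    else none)

-- A's `if (br,bc) not in visited: visited.add; queue.append` for each candidate
def pvEnq : List (Int × Int) → List (Int × Int) → List (Int × Int) →
    List (Int × Int) × List (Int × Int)
  | [], v, q => (v, q)
  | n :: ns, v, q => if n ∈ v then pvEnq ns v q else pvEnq ns (v ++ [n]) (q ++ [n])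

-- A's clean_matrix copy
def pvCleanMatrix (matrix : List String) (rows cols : Int) : List (List Char) :=
  (PySem.List.pyRange 0 rows 1).map (fun r =>
    (PySem.List.pyRange 0 cols 1).map (fun c => pvCleanChar (pvMget matrix r c)))

def pvCmGet (cm : List (List Char)) (r c : Int) : Char :=
  (PySem.List.pyGet? (PySem.List.pyGetD cm r []) c).getD '?'

def pvFreeA (cm : List (List Char)) (r c : Int) : Bool :=
  [' ', '.', '@', '+'].contains (pvCmGet cm r c)

-- A's per-goal BFS `while queue:` loop, accumulating the global reachable_squares set;
-- fuel is a termination guard only (chosen large enough in the caller).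
def pvBfsA (f : Int × Int → List (Int × Int)) :
    Nat → List (Int × Int) → List (Int × Int) → List (Int × Int) → List (Int × Int)
  | 0, _, _, reach => reach
  | _ + 1, [], _, reach => reach
  | fuel + 1, x :: q, v, reach =>
      let reach' := PySem.Set.add reach x
      let p := pvEnq (f x) v q
      pvBfsA f fuel p.2 p.1 reach'

def detect_simple_deadlocks (matrix : List String) : List (Int × Int) :=
  let rows : Int := matrix.length
  let cols : Int := PySem.Str.len (PySem.List.pyGetD matrix 0 "")
  let goals := pvGoals matrix
  let cm := pvCleanMatrix matrix rows cols
  let fuel := rows.toNat * cols.toNat + 2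
  let reach := goals.foldl
    (fun reach g => pvBfsA (pvNbrs (pvFreeA cm) rows cols) fuel [g] [g] reach) []
  (PySem.List.pyRange 0 rows 1).foldl (fun dl r =>
    (PySem.List.pyRange 0 cols 1).foldl (fun dl c =>
      if pvCmGet cm r c ∈ [' ', '.', '@', '+', '$', '*'] ∧ (r, c) ∉ reach ∧ (r, c) ∉ goals then
        PySem.Set.add dl (r, c)
      else dl) dl) []

-- ===== PORT B =====

-- B's free(r, c) (clean the character read from the matrix, then the free-cell test)
def pvFreeB (matrix : List String) (r c : Int) : Bool :=
  [' ', '.', '@', '+'].contains (pvCleanChar (pvMget matrix r c))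

-- B's per-cell test: unmarked, free, and `any(...)` over the four directions
def pvCellFire (matrix : List String) (rows cols : Int) (marked : List (Int × Int))
    (r c : Int) : Bool :=
  !(marked.contains (r, c)) && pvFreeB matrix r c &&
    pvDirs.any (fun d =>
      marked.contains (r - d.1, c - d.2) &&
      decide (0 ≤ r + d.1 ∧ r + d.1 < rows ∧ 0 ≤ c + d.2 ∧ c + d.2 < cols) &&
      pvFreeB matrix (r + d.1) (c + d.2))

-- one full sweep over the grid, threading (marked, changed)
def pvSweepOnce (matrix : List String) (rows cols : Int) (m : List (Int × Int)) :
    List (Int × Int) × Bool :=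
  (PySem.List.pyRange 0 rows 1).foldl (fun st r =>
    (PySem.List.pyRange 0 cols 1).foldl (fun st c =>
      if pvCellFire matrix rows cols st.1 r c then (PySem.Set.add st.1 (r, c), true) else st)
      st) (m, false)

-- B's `while changed:` loop; fuel is a termination guard only (every changing sweep marks
-- a fresh grid cell, so rows*cols+1 sweeps always suffice)
def pvSweepLoop (matrix : List String) (rows cols : Int) :
    Nat → List (Int × Int) → List (Int × Int)
  | 0, m => m
  | fuel + 1, m =>
      let p := pvSweepOnce matrix rows cols m
      if p.2 then pvSweepLoop matrix rows cols fuel p.1 else p.1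

def detect_simple_deadlocks_alt (matrix : List String) : List (Int × Int) :=
  let rows : Int := matrix.length
  let cols : Int := PySem.Str.len (PySem.List.pyGetD matrix 0 "")
  let marked := pvSweepLoop matrix rows cols (rows.toNat * cols.toNat + 1)
    (PySem.Set.ofList (pvGoals matrix))
  PySem.Set.ofList ((PySem.List.pyRange 0 rows 1).flatMap (fun r =>
    (PySem.List.pyRange 0 cols 1).filterMap (fun c =>
      if pvMget matrix r c ∈ [' ', '.', '@', '+', '$', '*'] ∧ (r, c) ∉ marked then
        some (r, c)
      else none)))

-- ===== PRECONDITION & SPEC =====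
-- Pre_ excludes exactly the inputs on which the Python A raises IndexError: the empty matrix
-- (len(matrix[0])) and matrices where some row is shorter than row 0 (clean-matrix indexing).
def Pre_detect_simple_deadlocks (matrix : List String) : Prop :=
  matrix ≠ [] ∧ ∀ row ∈ matrix, PySem.Str.len (PySem.List.pyGetD matrix 0 "") ≤ PySem.Str.len row
instance (matrix : List String) : Decidable (Pre_detect_simple_deadlocks matrix) := by
  unfold Pre_detect_simple_deadlocks; infer_instance

def pvWitness_detect_simple_deadlocks : List String := ["#####", "#@$.#", "#####"]

def Spec_detect_simple_deadlocks (matrix : List String) (out : List (Int × Int)) : Prop := out = detect_simple_deadlocks_alt matrix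
instance (matrix : List String) (out : List (Int × Int)) : Decidable (Spec_detect_simple_deadlocks matrix out) := by unfold Spec_detect_simple_deadlocks; infer_instance

-- ===== CLAIM (what is proved, stated in full; the proofs are below) =====
def Claim_equal_detect_simple_deadlocks : Prop := ∀ (matrix : List String), Dom_detect_simple_deadlocks matrix → Pre_detect_simple_deadlocks matrix → Spec_detect_simple_deadlocks matrix (detect_simple_deadlocks matrix)

-- ===== LEMMAS AND PROOFS =====

-- ---- shared reachability vocabulary ----

def pvReach (f : Int × Int → List (Int × Int)) (S : List (Int × Int)) (y : Int × Int) : Prop :=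
  ∃ s ∈ S, Relation.ReflTransGen (fun a b => b ∈ f a) s y

def pvUniv (rows cols : Int) : List (Int × Int) :=
  (PySem.List.pyRange 0 rows 1).flatMap (fun r =>
    (PySem.List.pyRange 0 cols 1).map (fun c => (r, c)))

theorem pvMem_univ (rows cols : Int) (p : Int × Int) :
    p ∈ pvUniv rows cols ↔ 0 ≤ p.1 ∧ p.1 < rows ∧ 0 ≤ p.2 ∧ p.2 < cols := by
  obtain ⟨r, c⟩ := p
  simp only [pvUniv, List.mem_flatMap, List.mem_map, PySem.List.mem_pyRange_one,
    Prod.mk.injEq]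
  constructor
  · rintro ⟨a, ha, b, hb, rfl, rfl⟩; exact ⟨ha.1, ha.2, hb.1, hb.2⟩
  · rintro ⟨h1, h2, h3, h4⟩; exact ⟨r, ⟨h1, h2⟩, c, ⟨h3, h4⟩, rfl, rfl⟩

theorem pvUniv_card (rows cols : Int) :
    (pvUniv rows cols).toFinset.card ≤ rows.toNat * cols.toNat := by
  have hlen : (pvUniv rows cols).length = rows.toNat * cols.toNat := by
    unfold pvUniv
    rw [List.length_flatMap]
    simp only [List.length_map, PySem.List.length_pyRange_one]
    rw [List.map_const', List.sum_replicate, PySem.List.length_pyRange_one]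
    simp
  calc (pvUniv rows cols).toFinset.card ≤ (pvUniv rows cols).length := List.toFinset_card_le _
    _ = rows.toNat * cols.toNat := hlen

theorem pvNbrs_img (free : Int → Int → Bool) (rows cols : Int) :
    ∀ x y, y ∈ pvNbrs free rows cols x → y ∈ pvUniv rows cols := by
  intro x y hy
  unfold pvNbrs at hy
  rw [List.mem_filterMap] at hy
  obtain ⟨d, _, hif⟩ := hy
  split at hif
  case isFalse => exact absurd hif (by simp)
  case isTrue h =>
    split at hif
    case isFalse => exact absurd hif (by simp)
    case isTrue =>
      obtain ⟨h1, h2, h3, h4, -⟩ := h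
      cases Option.some.inj hif
      exact (pvMem_univ rows cols _).2 ⟨h1, h2, h3, h4⟩

theorem pvMem_nbrs (free : Int → Int → Bool) (rows cols : Int) (p y : Int × Int) :
    y ∈ pvNbrs free rows cols p ↔ ∃ d ∈ pvDirs,
      (0 ≤ p.1 + d.1 ∧ p.1 + d.1 < rows ∧ 0 ≤ p.2 + d.2 ∧ p.2 + d.2 < cols ∧
       0 ≤ p.1 + d.1 + d.1 ∧ p.1 + d.1 + d.1 < rows ∧ 0 ≤ p.2 + d.2 + d.2 ∧ p.2 + d.2 + d.2 < cols) ∧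
      free (p.1 + d.1) (p.2 + d.2) = true ∧ free (p.1 + d.1 + d.1) (p.2 + d.2 + d.2) = true ∧
      y = (p.1 + d.1, p.2 + d.2) := by
  unfold pvNbrs
  rw [List.mem_filterMap]
  constructor
  · rintro ⟨d, hd, hif⟩
    refine ⟨d, hd, ?_⟩
    split at hif
    case isFalse => exact absurd hif (by simp)
    case isTrue h =>
      split at hif
      case isFalse => exact absurd hif (by simp)
      case isTrue h2 =>
        rw [Bool.and_eq_true] at h2
        cases Option.some.inj hif
        exact ⟨h, h2.1, h2.2, rfl⟩
  · rintro ⟨d, hd, h, hf1, hf2, rfl⟩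
    exact ⟨d, hd, by rw [if_pos h, if_pos (by rw [hf1, hf2]; rfl)]⟩

-- ---- A-side: queue BFS computes reachability (helper BFS without the reach accumulator) ----

def pvBfsV (f : Int × Int → List (Int × Int)) :
    Nat → List (Int × Int) → List (Int × Int) → List (Int × Int)
  | 0, _, v => v
  | _ + 1, [], v => v
  | fuel + 1, x :: q, v =>
      let p := pvEnq (f x) v q
      pvBfsV f fuel p.2 p.1

theorem pvEnq_spec (ns : List (Int × Int)) : ∀ v q : List (Int × Int),
    ∃ new, pvEnq ns v q = (v ++ new, q ++ new) ∧ new.Nodup ∧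
      (∀ y ∈ new, y ∈ ns ∧ y ∉ v) ∧ (∀ y ∈ ns, y ∈ v ++ new) := by
  induction ns with
  | nil => intro v q; exact ⟨[], by simp [pvEnq]⟩
  | cons n ns ih =>
    intro v q
    by_cases h : n ∈ v
    · obtain ⟨new, heq, hnd, hmem, hcov⟩ := ih v q
      refine ⟨new, by simp [pvEnq, h, heq], hnd, ?_, ?_⟩
      · exact fun y hy => ⟨List.mem_cons_of_mem _ (hmem y hy).1, (hmem y hy).2⟩
      · intro y hy
        rcases List.mem_cons.1 hy with rfl | hy
        · exact List.mem_append_left _ h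
        · exact hcov y hy
    · obtain ⟨new, heq, hnd, hmem, hcov⟩ := ih (v ++ [n]) (q ++ [n])
      refine ⟨n :: new, ?_, ?_, ?_, ?_⟩
      · simp only [pvEnq, h]
        rw [heq]; simp
      · refine List.nodup_cons.2 ⟨fun hn => ?_, hnd⟩
        exact (hmem n hn).2 (by simp)
      · intro y hy
        rcases List.mem_cons.1 hy with rfl | hy
        · exact ⟨List.mem_cons_self, h⟩
        · refine ⟨List.mem_cons_of_mem _ (hmem y hy).1, fun hv => (hmem y hy).2 ?_⟩
          exact List.mem_append_left _ hv
      · intro y hy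
        rcases List.mem_cons.1 hy with rfl | hy
        · simp
        · have := hcov y hy
          simp only [List.mem_append, List.mem_cons] at this ⊢
          tauto

theorem pvBfsV_mono (f : Int × Int → List (Int × Int)) :
    ∀ (fuel : Nat) (q v : List (Int × Int)), ∀ x ∈ v, x ∈ pvBfsV f fuel q v := by
  intro fuel
  induction fuel with
  | zero => intro q v x hx; simpa [pvBfsV] using hx
  | succ n ih =>
    intro q v x hx
    cases q with
    | nil => simpa [pvBfsV] using hx
    | cons a q =>
      obtain ⟨new, heq, -, -, -⟩ := pvEnq_spec (f a) v q
      simp only [pvBfsV, heq]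
      exact ih _ _ x (List.mem_append_left _ hx)

theorem pvCard_step (univ v new : List (Int × Int)) (hnd : new.Nodup)
    (hnew : ∀ y ∈ new, y ∈ univ ∧ y ∉ v) :
    (univ.toFinset \ (v ++ new).toFinset).card + new.length ≤ (univ.toFinset \ v.toFinset).card := by
  have hsub : new.toFinset ⊆ univ.toFinset \ v.toFinset := by
    intro y hy
    simp only [List.mem_toFinset] at hy
    simp only [Finset.mem_sdiff, List.mem_toFinset]
    exact hnew y hy
  have h1 : univ.toFinset \ (v ++ new).toFinset = (univ.toFinset \ v.toFinset) \ new.toFinset := by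
    ext y; simp [List.mem_toFinset]; tauto
  have h2 : ((univ.toFinset \ v.toFinset) \ new.toFinset).card
      = (univ.toFinset \ v.toFinset).card - new.toFinset.card := by
    rw [Finset.card_sdiff, Finset.inter_eq_left.2 hsub]
  have h3 : new.toFinset.card = new.length := by
    rw [List.toFinset_card_of_nodup hnd]
  have h4 : new.toFinset.card ≤ (univ.toFinset \ v.toFinset).card := Finset.card_le_card hsub
  rw [h1, h2]; omega

theorem pvBfsV_spec (f : Int × Int → List (Int × Int)) (univ : List (Int × Int)) (R : Int × Int → Prop)
    (hImg : ∀ x y, y ∈ f x → y ∈ univ) (hR : ∀ x y, R x → y ∈ f x → R y) :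
    ∀ (fuel : Nat) (q v : List (Int × Int)),
      (∀ x ∈ q, x ∈ v) →
      (∀ x ∈ v, x ∉ q → ∀ y ∈ f x, y ∈ v) →
      (∀ x ∈ v, R x) →
      (univ.toFinset \ v.toFinset).card + q.length ≤ fuel →
      (∀ x ∈ pvBfsV f fuel q v, R x) ∧
      (∀ x ∈ pvBfsV f fuel q v, ∀ y ∈ f x, y ∈ pvBfsV f fuel q v) := by
  intro fuel
  induction fuel with
  | zero =>
    intro q v hqv hcl hvR hfuel
    have hq : q = [] := List.eq_nil_of_length_eq_zero (by omega)
    subst hq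
    exact ⟨fun x hx => hvR x hx, fun x hx y hy => hcl x hx (by simp) y hy⟩
  | succ n ih =>
    intro q v hqv hcl hvR hfuel
    cases q with
    | nil =>
      simp only [pvBfsV]
      exact ⟨fun x hx => hvR x hx, fun x hx y hy => hcl x hx (by simp) y hy⟩
    | cons a q =>
      obtain ⟨new, heq, hnd, hmem, hcov⟩ := pvEnq_spec (f a) v q
      simp only [pvBfsV, heq]
      have hav : a ∈ v := hqv a List.mem_cons_self
      refine ih (q ++ new) (v ++ new) ?_ ?_ ?_ ?_
      · intro x hx
        rcases List.mem_append.1 hx with hx | hx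
        · exact List.mem_append_left _ (hqv x (List.mem_cons_of_mem _ hx))
        · exact List.mem_append_right _ hx
      · intro z hz hznq y hy
        have hznew : z ∉ new := fun h => hznq (List.mem_append_right _ h)
        have hzv : z ∈ v := by
          rcases List.mem_append.1 hz with h | h
          · exact h
          · exact absurd h hznew
        by_cases hza : z = a
        · subst hza; exact hcov y hy
        · exact List.mem_append_left _
            (hcl z hzv (by simp [hza]; exact fun h => hznq (List.mem_append_left _ h)) y hy)
      · intro z hz
        rcases List.mem_append.1 hz with h | h
        · exact hvR z h
        · exact hR a z (hvR a hav) (hmem z h).1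
      · have hcount := pvCard_step univ v new hnd
          (fun y hy => ⟨hImg a y (hmem y hy).1, (hmem y hy).2⟩)
        simp only [List.length_append, List.length_cons] at hfuel ⊢
        omega

theorem pvBfsV_char (f : Int × Int → List (Int × Int)) (univ : List (Int × Int))
    (hImg : ∀ x y, y ∈ f x → y ∈ univ) (fuel : Nat) (q : List (Int × Int))
    (hfuel : (univ.toFinset \ (PySem.Set.ofList q).toFinset).card + q.length ≤ fuel) :
    ∀ y, y ∈ pvBfsV f fuel q (PySem.Set.ofList q) ↔ pvReach f q y := by
  have hspec := pvBfsV_spec f univ (pvReach f q) hImg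
    (fun x y hx hy => by
      obtain ⟨s, hs, hr⟩ := hx
      exact ⟨s, hs, hr.tail hy⟩)
    fuel q (PySem.Set.ofList q)
    (fun x hx => (PySem.Set.mem_ofList _ _).2 hx)
    (fun x hx hnq => absurd ((PySem.Set.mem_ofList _ _).1 hx) hnq)
    (fun x hx => ⟨x, (PySem.Set.mem_ofList _ _).1 hx, Relation.ReflTransGen.refl⟩)
    hfuel
  intro y
  constructor
  · exact fun hy => hspec.1 y hy
  · rintro ⟨s, hs, hr⟩
    induction hr with
    | refl => exact pvBfsV_mono f fuel q _ s ((PySem.Set.mem_ofList _ _).2 hs)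
    | tail hr hstep ih => exact hspec.2 _ ih _ hstep

theorem pvBfsA_eq (f : Int × Int → List (Int × Int)) (univ : List (Int × Int))
    (hImg : ∀ x y, y ∈ f x → y ∈ univ) :
    ∀ (fuel : Nat) (q v reach : List (Int × Int)),
      (∀ x ∈ q, x ∈ v) → (∀ z ∈ v, z ∈ reach ∨ z ∈ q) →
      (univ.toFinset \ v.toFinset).card + q.length ≤ fuel →
      ∀ y, y ∈ pvBfsA f fuel q v reach ↔ y ∈ reach ∨ y ∈ pvBfsV f fuel q v := by
  intro fuel
  induction fuel with
  | zero =>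
    intro q v reach hqv hvr hfuel y
    have hq : q = [] := List.eq_nil_of_length_eq_zero (by omega)
    subst hq
    simp only [pvBfsA, pvBfsV]
    constructor
    · exact fun h => Or.inl h
    · rintro (h | h)
      · exact h
      · rcases hvr y h with h' | h'
        · exact h'
        · simp at h'
  | succ n ih =>
    intro q v reach hqv hvr hfuel y
    cases q with
    | nil =>
      simp only [pvBfsA, pvBfsV]
      constructor
      · exact fun h => Or.inl h
      · rintro (h | h)
        · exact h
        · rcases hvr y h with h' | h'
          · exact h'
          · simp at h'
    | cons a q =>
      obtain ⟨new, heq, hnd, hmem, hcov⟩ := pvEnq_spec (f a) v q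
      simp only [pvBfsA, pvBfsV, heq]
      have hav : a ∈ v := hqv a List.mem_cons_self
      have hcount := pvCard_step univ v new hnd
        (fun z hz => ⟨hImg a z (hmem z hz).1, (hmem z hz).2⟩)
      rw [ih (q ++ new) (v ++ new) (PySem.Set.add reach a) ?hqv ?hvr ?hf y]
      case hqv =>
        intro x hx
        rcases List.mem_append.1 hx with hx | hx
        · exact List.mem_append_left _ (hqv x (List.mem_cons_of_mem _ hx))
        · exact List.mem_append_right _ hx
      case hvr =>
        intro z hz
        rcases List.mem_append.1 hz with hz | hz
        · rcases hvr z hz with h | h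
          · exact Or.inl ((PySem.Set.mem_add _ _ _).2 (Or.inl h))
          · rcases List.mem_cons.1 h with rfl | h
            · exact Or.inl ((PySem.Set.mem_add _ _ _).2 (Or.inr rfl))
            · exact Or.inr (List.mem_append_left _ h)
        · exact Or.inr (List.mem_append_right _ hz)
      case hf =>
        simp only [List.length_append, List.length_cons] at hfuel ⊢
        omega
      rw [PySem.Set.mem_add]
      have haB : a ∈ pvBfsV f n (q ++ new) (v ++ new) :=
        pvBfsV_mono f n _ _ a (List.mem_append_left _ hav)
      constructor
      · rintro (⟨h | rfl⟩ | h)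
        · exact Or.inl h
        · exact Or.inr haB
        · exact Or.inr h
      · rintro (h | h)
        · exact Or.inl (Or.inl h)
        · exact Or.inr h

theorem pvFoldA_char (f : Int × Int → List (Int × Int)) (univ : List (Int × Int))
    (hImg : ∀ x y, y ∈ f x → y ∈ univ) (fuel : Nat)
    (hfuel : univ.toFinset.card + 1 ≤ fuel) :
    ∀ (gs acc : List (Int × Int)), ∀ y,
      y ∈ gs.foldl (fun reach g => pvBfsA f fuel [g] [g] reach) acc ↔
        y ∈ acc ∨ pvReach f gs y := by
  intro gs
  induction gs with
  | nil => intro acc y; simp [pvReach]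
  | cons g gs ih =>
    intro acc y
    simp only [List.foldl_cons]
    rw [ih]
    have h1 : ∀ z, z ∈ pvBfsA f fuel [g] [g] acc ↔ z ∈ acc ∨ z ∈ pvBfsV f fuel [g] [g] := by
      intro z
      refine pvBfsA_eq f univ hImg fuel [g] [g] acc ?_ ?_ ?_ z
      · intro x hx; exact hx
      · intro x hx; exact Or.inr hx
      · have : (univ.toFinset \ ([g] : List (Int × Int)).toFinset).card ≤ univ.toFinset.card :=
          Finset.card_le_card (Finset.sdiff_subset)
        simp only [List.length_cons, List.length_nil]
        omega
    have h2 : ∀ z, z ∈ pvBfsV f fuel [g] [g] ↔ pvReach f [g] z := by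
      intro z
      have : PySem.Set.ofList [g] = [g] := rfl
      rw [← this]
      refine pvBfsV_char f univ hImg fuel [g] ?_ z
      rw [this]
      have : (univ.toFinset \ ([g] : List (Int × Int)).toFinset).card ≤ univ.toFinset.card :=
        Finset.card_le_card (Finset.sdiff_subset)
      simp only [List.length_cons, List.length_nil]
      omega
    constructor
    · rintro (h | h)
      · rw [h1] at h
        rcases h with h | h
        · exact Or.inl h
        · rw [h2] at h
          obtain ⟨s, hs, hr⟩ := h
          rw [List.mem_singleton] at hs
          exact Or.inr ⟨s, hs ▸ List.mem_cons_self, hr⟩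
      · obtain ⟨s, hs, hr⟩ := h
        exact Or.inr ⟨s, List.mem_cons_of_mem _ hs, hr⟩
    · rintro (h | ⟨s, hs, hr⟩)
      · exact Or.inl ((h1 y).2 (Or.inl h))
      · rcases List.mem_cons.1 hs with rfl | hs
        · exact Or.inl ((h1 y).2 (Or.inr ((h2 y).2 ⟨s, by simp, hr⟩)))
        · exact Or.inr ⟨s, hs, hr⟩

theorem pvCmGet_eq (matrix : List String) (rows cols r c : Int)
    (hr0 : 0 ≤ r) (hr : r < rows) (hc0 : 0 ≤ c) (hc : c < cols) :
    pvCmGet (pvCleanMatrix matrix rows cols) r c = pvCleanChar (pvMget matrix r c) := by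
  show PySem.List.pyGetD (PySem.List.pyGetD (pvCleanMatrix matrix rows cols) r []) c '?' = _
  unfold pvCleanMatrix
  rw [PySem.List.pyGetD_map_pyRange_of_nonneg _ rows r _ hr0 hr]
  rw [PySem.List.pyGetD_map_pyRange_of_nonneg _ cols c _ hc0 hc]

theorem pvFree_eq (matrix : List String) (rows cols r c : Int)
    (hr0 : 0 ≤ r) (hr : r < rows) (hc0 : 0 ≤ c) (hc : c < cols) :
    pvFreeA (pvCleanMatrix matrix rows cols) r c = pvFreeB matrix r c := by
  unfold pvFreeA pvFreeB
  rw [pvCmGet_eq matrix rows cols r c hr0 hr hc0 hc]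

theorem pvNbrs_eq (matrix : List String) (rows cols : Int) :
    pvNbrs (pvFreeA (pvCleanMatrix matrix rows cols)) rows cols = pvNbrs (pvFreeB matrix) rows cols := by
  funext p
  unfold pvNbrs
  refine List.filterMap_congr ?_
  intro d _
  by_cases h : 0 ≤ p.1 + d.1 ∧ p.1 + d.1 < rows ∧ 0 ≤ p.2 + d.2 ∧ p.2 + d.2 < cols ∧
      0 ≤ p.1 + d.1 + d.1 ∧ p.1 + d.1 + d.1 < rows ∧ 0 ≤ p.2 + d.2 + d.2 ∧ p.2 + d.2 + d.2 < cols
  · rw [if_pos h, if_pos h]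
    obtain ⟨h1, h2, h3, h4, h5, h6, h7, h8⟩ := h
    rw [pvFree_eq matrix rows cols _ _ h1 h2 h3 h4, pvFree_eq matrix rows cols _ _ h5 h6 h7 h8]
  · rw [if_neg h, if_neg h]

-- ---- B-side: the sweep fixed point computes the same reachability ----

-- the per-cell test fires exactly on unmarked legal push-targets of marked squares
theorem pvCellFire_iff (matrix : List String) (rows cols : Int) (m : List (Int × Int))
    (r c : Int) (hr0 : 0 ≤ r) (hr : r < rows) (hc0 : 0 ≤ c) (hc : c < cols) :
    pvCellFire matrix rows cols m r c = true ↔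
      ((r, c) ∉ m ∧ ∃ s ∈ m, (r, c) ∈ pvNbrs (pvFreeB matrix) rows cols s) := by
  unfold pvCellFire
  simp only [Bool.and_eq_true, Bool.not_eq_true', List.contains_eq_mem, decide_eq_false_iff_not,
    decide_eq_true_eq, List.any_eq_true]
  constructor
  · rintro ⟨⟨hnm, hfree⟩, d, hd, ⟨hsm, hb1, hb2, hb3, hb4⟩, hf⟩
    refine ⟨hnm, (r - d.1, c - d.2), hsm, ?_⟩
    rw [pvMem_nbrs]
    refine ⟨d, hd, ⟨by omega, by omega, by omega, by omega, by omega, by omega, by omega, by omega⟩,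
      ?_, ?_, ?_⟩
    · have e1 : r - d.1 + d.1 = r := by omega
      have e2 : c - d.2 + d.2 = c := by omega
      rw [e1, e2]; exact hfree
    · have e1 : r - d.1 + d.1 + d.1 = r + d.1 := by omega
      have e2 : c - d.2 + d.2 + d.2 = c + d.2 := by omega
      rw [e1, e2]; exact hf
    · have e1 : r - d.1 + d.1 = r := by omega
      have e2 : c - d.2 + d.2 = c := by omega
      rw [e1, e2]
  · rintro ⟨hnm, s, hsm, hnb⟩
    rw [pvMem_nbrs] at hnb
    obtain ⟨d, hd, hb, hf1, hf2, heq⟩ := hnb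
    have hs1 : s.1 = r - d.1 := by
      have := congrArg Prod.fst heq; simp at this; omega
    have hs2 : s.2 = c - d.2 := by
      have := congrArg Prod.snd heq; simp at this; omega
    have hr1 : s.1 + d.1 = r := by omega
    have hc1 : s.2 + d.2 = c := by omega
    obtain ⟨b1, b2, b3, b4, b5, b6, b7, b8⟩ := hb
    refine ⟨⟨hnm, by rw [← hr1, ← hc1]; exact hf1⟩, d, hd,
      ⟨⟨by rw [← hs1, ← hs2]; exact hsm, by omega, by omega, by omega, by omega⟩, ?_⟩⟩
    have e1 : r + d.1 = s.1 + d.1 + d.1 := by omega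
    have e2 : c + d.2 = s.2 + d.2 + d.2 := by omega
    rw [e1, e2]; exact hf2

-- the sweep as a fold over the flattened grid-cell list
def pvStep (matrix : List String) (rows cols : Int)
    (st : List (Int × Int) × Bool) (p : Int × Int) : List (Int × Int) × Bool :=
  if pvCellFire matrix rows cols st.1 p.1 p.2 then (PySem.Set.add st.1 p, true) else st

theorem pvSweepOnce_eq (matrix : List String) (rows cols : Int) (m : List (Int × Int)) :
    pvSweepOnce matrix rows cols m
      = (pvUniv rows cols).foldl (pvStep matrix rows cols) (m, false) := by
  unfold pvSweepOnce pvUniv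
  rw [List.foldl_flatMap]
  have hfun : (fun (st : List (Int × Int) × Bool) (r : Int) =>
        (PySem.List.pyRange 0 cols 1).foldl (fun st c =>
          if pvCellFire matrix rows cols st.1 r c then (PySem.Set.add st.1 (r, c), true) else st) st)
      = (fun (st : List (Int × Int) × Bool) (r : Int) =>
        ((PySem.List.pyRange 0 cols 1).map (fun c => (r, c))).foldl
          (pvStep matrix rows cols) st) := by
    funext st r
    rw [List.foldl_map]
    rfl
  rw [hfun]

-- fold basics: marks only grow, changed is sticky, and a changed sweep marked a
-- fresh cell of the swept list
theorem pvFold_mono (matrix : List String) (rows cols : Int) :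
    ∀ (L : List (Int × Int)) (st : (List (Int × Int)) × Bool),
      (∀ x ∈ st.1, x ∈ (L.foldl (pvStep matrix rows cols) st).1) ∧
      (st.2 = true → (L.foldl (pvStep matrix rows cols) st).2 = true) ∧
      ((L.foldl (pvStep matrix rows cols) st).2 = true →
        st.2 = true ∨ ∃ x ∈ L, x ∈ (L.foldl (pvStep matrix rows cols) st).1 ∧ x ∉ st.1) := by
  intro L
  induction L with
  | nil => intro st; exact ⟨fun x hx => hx, fun h => h, fun h => Or.inl h⟩
  | cons p L ih =>
    intro st
    simp only [List.foldl_cons]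
    by_cases hf : pvCellFire matrix rows cols st.1 p.1 p.2 = true
    · have hstep : pvStep matrix rows cols st p = (PySem.Set.add st.1 p, true) := by
        simp [pvStep, hf]
      rw [hstep]
      obtain ⟨m1, m2, m3⟩ := ih (PySem.Set.add st.1 p, true)
      refine ⟨?_, fun _ => m2 rfl, fun _ => ?_⟩
      · intro x hx
        exact m1 x ((PySem.Set.mem_add _ _ _).2 (Or.inl hx))
      · right
        refine ⟨p, List.mem_cons_self, m1 p ((PySem.Set.mem_add _ _ _).2 (Or.inr rfl)), ?_⟩
        unfold pvCellFire at hf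
        simp only [Bool.and_eq_true, Bool.not_eq_true', List.contains_eq_mem,
          decide_eq_false_iff_not] at hf
        exact hf.1.1
    · have hstep : pvStep matrix rows cols st p = st := by
        simp [pvStep, hf]
      rw [hstep]
      obtain ⟨m1, m2, m3⟩ := ih st
      refine ⟨m1, m2, fun h => ?_⟩
      rcases m3 h with h | ⟨x, hxL, hx1, hx2⟩
      · exact Or.inl h
      · exact Or.inr ⟨x, List.mem_cons_of_mem _ hxL, hx1, hx2⟩

-- an unchanged sweep left the marks alone and found no firing cell
theorem pvFold_fix (matrix : List String) (rows cols : Int) :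
    ∀ (L : List (Int × Int)) (st : (List (Int × Int)) × Bool),
      (L.foldl (pvStep matrix rows cols) st).2 = false →
      (L.foldl (pvStep matrix rows cols) st).1 = st.1 ∧
      (∀ p ∈ L, pvCellFire matrix rows cols st.1 p.1 p.2 = false) := by
  intro L
  induction L with
  | nil => intro st _; exact ⟨rfl, fun p hp => absurd hp (List.not_mem_nil)⟩
  | cons p L ih =>
    intro st hfalse
    simp only [List.foldl_cons] at hfalse ⊢
    by_cases hf : pvCellFire matrix rows cols st.1 p.1 p.2 = true
    · exfalso
      have hstep : pvStep matrix rows cols st p = (PySem.Set.add st.1 p, true) := by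
        simp [pvStep, hf]
      rw [hstep] at hfalse
      have := (pvFold_mono matrix rows cols L (PySem.Set.add st.1 p, true)).2.1 rfl
      rw [this] at hfalse; exact Bool.true_eq_false.mp hfalse
    · have hstep : pvStep matrix rows cols st p = st := by
        simp [pvStep, hf]
      rw [hstep] at hfalse ⊢
      obtain ⟨h1, h2⟩ := ih st hfalse
      refine ⟨h1, fun q hq => ?_⟩
      rcases List.mem_cons.1 hq with rfl | hq
      · exact Bool.not_eq_true _ |>.mp hf
      · exact h2 q hq

-- soundness of one sweep over grid cells: every mark it adds satisfies R
theorem pvFold_sound (matrix : List String) (rows cols : Int) (R : Int × Int → Prop)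
    (hR : ∀ (m : List (Int × Int)) (p : Int × Int), p ∈ pvUniv rows cols → (∀ x ∈ m, R x) →
      pvCellFire matrix rows cols m p.1 p.2 = true → R p) :
    ∀ (L : List (Int × Int)), (∀ p ∈ L, p ∈ pvUniv rows cols) →
    ∀ (st : (List (Int × Int)) × Bool),
      (∀ x ∈ st.1, R x) → ∀ x ∈ (L.foldl (pvStep matrix rows cols) st).1, R x := by
  intro L
  induction L with
  | nil => intro _ st h; exact h
  | cons p L ih =>
    intro hL st hst
    simp only [List.foldl_cons]
    by_cases hf : pvCellFire matrix rows cols st.1 p.1 p.2 = true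
    · have hstep : pvStep matrix rows cols st p = (PySem.Set.add st.1 p, true) := by
        simp [pvStep, hf]
      rw [hstep]
      refine ih (fun q hq => hL q (List.mem_cons_of_mem _ hq)) _ ?_
      intro x hx
      rcases (PySem.Set.mem_add _ _ _).1 hx with h | rfl
      · exact hst x h
      · exact hR st.1 x (hL x List.mem_cons_self) hst hf
    · have hstep : pvStep matrix rows cols st p = st := by
        simp [pvStep, hf]
      rw [hstep]
      exact ih (fun q hq => hL q (List.mem_cons_of_mem _ hq)) st hst

-- the sweep loop: marks grow, stay sound, and end in a state where no grid cell fires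
theorem pvSweepLoop_spec (matrix : List String) (rows cols : Int) (R : Int × Int → Prop)
    (hR : ∀ (m : List (Int × Int)) (p : Int × Int), p ∈ pvUniv rows cols → (∀ x ∈ m, R x) →
      pvCellFire matrix rows cols m p.1 p.2 = true → R p) :
    ∀ (fuel : Nat) (m : List (Int × Int)),
      ((pvUniv rows cols).toFinset \ m.toFinset).card < fuel →
      (∀ x ∈ m, R x) →
      (∀ x ∈ m, x ∈ pvSweepLoop matrix rows cols fuel m) ∧
      (∀ x ∈ pvSweepLoop matrix rows cols fuel m, R x) ∧
      (∀ p ∈ pvUniv rows cols,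
        pvCellFire matrix rows cols (pvSweepLoop matrix rows cols fuel m) p.1 p.2 = false) := by
  intro fuel
  induction fuel with
  | zero => intro m hcard; omega
  | succ n ih =>
    intro m hcard hm
    simp only [pvSweepLoop, pvSweepOnce_eq]
    set st := (pvUniv rows cols).foldl (pvStep matrix rows cols) (m, false) with hst
    obtain ⟨m1, -, m3⟩ := pvFold_mono matrix rows cols (pvUniv rows cols) (m, false)
    by_cases hch : st.2 = true
    · rw [if_pos hch]
      rcases m3 hch with h | ⟨x, hxL, hx1, hx2⟩
      · exact absurd h (by simp)
      · have hsub : m.toFinset ⊆ st.1.toFinset := by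
          intro y hy
          rw [List.mem_toFinset] at hy ⊢
          exact m1 y hy
        have hlt : ((pvUniv rows cols).toFinset \ st.1.toFinset).card
            < ((pvUniv rows cols).toFinset \ m.toFinset).card := by
          refine Finset.card_lt_card
            ⟨Finset.sdiff_subset_sdiff (Finset.Subset.refl _) hsub, ?_⟩
          intro hsub2
          have hx : x ∈ (pvUniv rows cols).toFinset \ m.toFinset := by
            simp only [Finset.mem_sdiff, List.mem_toFinset]
            exact ⟨hxL, hx2⟩
          have := hsub2 hx
          simp only [Finset.mem_sdiff, List.mem_toFinset] at this
          exact this.2 hx1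
        have hmR : ∀ x ∈ st.1, R x :=
          pvFold_sound matrix rows cols R hR (pvUniv rows cols) (fun p hp => hp) (m, false) hm
        obtain ⟨i1, i2, i3⟩ := ih st.1 (by omega) hmR
        exact ⟨fun x hx => i1 x (m1 x hx), i2, i3⟩
    · rw [if_neg hch]
      have hfix := pvFold_fix matrix rows cols (pvUniv rows cols) (m, false)
        (Bool.not_eq_true _ |>.mp hch)
      rw [hfix.1]
      exact ⟨fun x hx => hx, hm, fun p hp => hfix.1 ▸ hfix.2 p hp⟩

-- characterisation of the final mark set: exactly the squares reachable from the goals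
theorem pvSweep_char (matrix : List String) (rows cols : Int) (goals : List (Int × Int))
    (fuel : Nat) (hfuel : ((pvUniv rows cols).toFinset).card < fuel) :
    ∀ y, y ∈ pvSweepLoop matrix rows cols fuel (PySem.Set.ofList goals)
      ↔ pvReach (pvNbrs (pvFreeB matrix) rows cols) goals y := by
  set f := pvNbrs (pvFreeB matrix) rows cols with hf
  have hR : ∀ (m : List (Int × Int)) (p : Int × Int), p ∈ pvUniv rows cols →
      (∀ x ∈ m, pvReach f goals x) →
      pvCellFire matrix rows cols m p.1 p.2 = true → pvReach f goals p := by
    intro m p hp hm hfire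
    rw [pvMem_univ] at hp
    rw [pvCellFire_iff matrix rows cols m p.1 p.2 hp.1 hp.2.1 hp.2.2.1 hp.2.2.2] at hfire
    obtain ⟨-, s, hsm, hedge⟩ := hfire
    obtain ⟨g, hg, hr⟩ := hm s hsm
    exact ⟨g, hg, hr.tail hedge⟩
  have hcard : ((pvUniv rows cols).toFinset \ (PySem.Set.ofList goals).toFinset).card < fuel := by
    have : ((pvUniv rows cols).toFinset \ (PySem.Set.ofList goals).toFinset).card
        ≤ ((pvUniv rows cols).toFinset).card := Finset.card_le_card Finset.sdiff_subset
    omega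
  have hinit : ∀ x ∈ PySem.Set.ofList goals, pvReach f goals x := by
    intro x hx
    exact ⟨x, (PySem.Set.mem_ofList _ _).1 hx, Relation.ReflTransGen.refl⟩
  obtain ⟨s1, s2, s3⟩ := pvSweepLoop_spec matrix rows cols (pvReach f goals) hR fuel
    (PySem.Set.ofList goals) hcard hinit
  intro y
  constructor
  · exact fun hy => s2 y hy
  · rintro ⟨g, hg, hr⟩
    induction hr with
    | refl => exact s1 g ((PySem.Set.mem_ofList _ _).2 hg)
    | @tail x y hr hstep ih =>
      by_cases hy : y ∈ pvSweepLoop matrix rows cols fuel (PySem.Set.ofList goals)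
      · exact hy
      · exfalso
        have hyu : y ∈ pvUniv rows cols := pvNbrs_img (pvFreeB matrix) rows cols x y hstep
        have hb := (pvMem_univ rows cols y).1 hyu
        have hfire : pvCellFire matrix rows cols
            (pvSweepLoop matrix rows cols fuel (PySem.Set.ofList goals)) y.1 y.2 = true := by
          rw [pvCellFire_iff matrix rows cols _ y.1 y.2 hb.1 hb.2.1 hb.2.2.1 hb.2.2.2]
          exact ⟨hy, x, ih, hstep⟩
        have := s3 y hyu
        rw [this] at hfire
        exact Bool.false_ne_true hfire

-- ---- final scan equivalence ----

theorem pvCleanChar_mem (ch : Char) :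
    pvCleanChar ch ∈ [' ', '.', '@', '+', '$', '*'] ↔ ch ∈ [' ', '.', '@', '+', '$', '*'] := by
  unfold pvCleanChar
  split_ifs with h1 h2
  · subst h1; decide
  · subst h2; decide
  · exact Iff.rfl

theorem pvScan_inner (r : Int) (cond1 cond2 : Int → Prop)
    [DecidablePred cond1] [DecidablePred cond2]
    (C : List Int) (h : ∀ c ∈ C, cond1 c ↔ cond2 c) :
    ∀ init : List (Int × Int),
      C.foldl (fun dl c => if cond1 c then PySem.Set.add dl (r, c) else dl) init
        = (C.filterMap (fun c => if cond2 c then some (r, c) else none)).foldl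
            PySem.Set.add init := by
  induction C with
  | nil => intro init; rfl
  | cons c C ih =>
    intro init
    have hc := h c List.mem_cons_self
    have ih' := ih (fun c hc => h c (List.mem_cons_of_mem _ hc))
    by_cases h2 : cond2 c
    · simp only [List.foldl_cons, List.filterMap_cons, if_pos h2, if_pos (hc.2 h2)]
      exact ih' _
    · simp only [List.foldl_cons, List.filterMap_cons, if_neg h2, if_neg (fun h1 => h2 (hc.1 h1))]
      exact ih' _

theorem pvScan_eq (cond1 cond2 : Int → Int → Prop)
    [inst1 : ∀ r c, Decidable (cond1 r c)] [inst2 : ∀ r c, Decidable (cond2 r c)]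
    (C : List Int) :
    ∀ (R : List Int), (∀ r ∈ R, ∀ c ∈ C, cond1 r c ↔ cond2 r c) →
    ∀ init : List (Int × Int),
      R.foldl (fun dl r => C.foldl
          (fun dl c => if cond1 r c then PySem.Set.add dl (r, c) else dl) dl) init
        = (R.flatMap (fun r =>
            C.filterMap (fun c => if cond2 r c then some (r, c) else none))).foldl
              PySem.Set.add init := by
  intro R
  induction R with
  | nil => intro h init; rfl
  | cons r R ih =>
    intro h init
    simp only [List.foldl_cons, List.flatMap_cons, List.foldl_append]
    rw [pvScan_inner r (cond1 r) (cond2 r) C (h r List.mem_cons_self) init]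
    exact ih (fun r hr => h r (List.mem_cons_of_mem _ hr)) _

theorem pvMain (matrix : List String) :
    detect_simple_deadlocks matrix = detect_simple_deadlocks_alt matrix := by
  unfold detect_simple_deadlocks detect_simple_deadlocks_alt
  dsimp only []
  rw [pvNbrs_eq matrix (matrix.length : Int) (PySem.Str.len (PySem.List.pyGetD matrix 0 ""))]
  set rows : Int := (matrix.length : Int) with hrowsdef
  set cols : Int := PySem.Str.len (PySem.List.pyGetD matrix 0 "") with hcolsdef
  set goals : List (Int × Int) := pvGoals matrix with hgoalsdef
  set f : Int × Int → List (Int × Int) := pvNbrs (pvFreeB matrix) rows cols with hfdef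
  set cm : List (List Char) := pvCleanMatrix matrix rows cols with hcmdef
  set reach : List (Int × Int) := goals.foldl
      (fun reach g => pvBfsA f (rows.toNat * cols.toNat + 2) [g] [g] reach) [] with hreachdef
  set marked : List (Int × Int) := pvSweepLoop matrix rows cols (rows.toNat * cols.toNat + 1)
      (PySem.Set.ofList goals) with hmdef
  have hImg := pvNbrs_img (pvFreeB matrix) rows cols
  have hcard := pvUniv_card rows cols
  have hreachc : ∀ z, z ∈ reach ↔ pvReach f goals z := by
    intro z
    rw [hreachdef, pvFoldA_char f (pvUniv rows cols) hImg _ (by omega) goals []]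
    simp
  have hmc : ∀ z, z ∈ marked ↔ pvReach f goals z := by
    intro z
    rw [hmdef]
    exact pvSweep_char matrix rows cols goals _ (by omega) z
  have hgsub : ∀ g ∈ goals, g ∈ marked :=
    fun g hg => (hmc g).2 ⟨g, hg, Relation.ReflTransGen.refl⟩
  rw [pvScan_eq
      (fun r c => pvCmGet cm r c ∈ [' ', '.', '@', '+', '$', '*'] ∧ (r, c) ∉ reach ∧ (r, c) ∉ goals)
      (fun r c => pvMget matrix r c ∈ [' ', '.', '@', '+', '$', '*'] ∧ (r, c) ∉ marked)
      (PySem.List.pyRange 0 cols 1) (PySem.List.pyRange 0 rows 1) ?_ []]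
  · rfl
  · intro r hr c hc
    rw [PySem.List.mem_pyRange_one] at hr hc
    beta_reduce
    rw [pvCmGet_eq matrix rows cols r c hr.1 hr.2 hc.1 hc.2, pvCleanChar_mem]
    constructor
    · rintro ⟨ha, hnr, hng⟩
      refine ⟨ha, fun hv => hnr ((hreachc _).2 ((hmc _).1 hv))⟩
    · rintro ⟨ha, hnv⟩
      exact ⟨ha, fun hr' => hnv ((hmc _).2 ((hreachc _).1 hr')),
        fun hg => hnv (hgsub _ hg)⟩

-- ===== VERDICT (by name: the statement is the Claim_ definition above) =====
theorem detect_simple_deadlocks_spec : Claim_equal_detect_simple_deadlocks := by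
  intro matrix _ _
  exact pvMain matrix
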